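-- pv_equiv track=rewrite | github.com/bozertron/Orchestr8_jr | 888/senses/enhanced_speech.py | _apply_writing_corrections
-- ===== SOURCE A (Python) =====
-- def _apply_writing_corrections(text: str) -> str:
--     """Apply writing-specific corrections to transcription."""
--     # Common writing transcription corrections
--     corrections = {
--         'period': '.',
--         'comma': ',',
--         'question mark': '?',
--         'exclamation point': '!',
--         'new paragraph': '\n\n',
--         'new line': '\n'
--     }
--
--     corrected_text = text
--     for phrase, replacement in corrections.items():
--         corrected_text = corrected_text.replace(phrase, replacement)
--
--     return corrected_text
-- ===== SOURCE B (Python) =====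
-- import re
--
-- _CORRECTIONS = {
--     'period': '.',
--     'comma': ',',
--     'question mark': '?',
--     'exclamation point': '!',
--     'new paragraph': '\n\n',
--     'new line': '\n'
-- }
--
-- _PATTERN = re.compile('|'.join(re.escape(phrase) for phrase in _CORRECTIONS))
--
--
-- def _apply_writing_corrections(text: str) -> str:
--     """Apply writing-specific corrections to transcription (single regex pass)."""
--     return _PATTERN.sub(lambda m: _CORRECTIONS[m.group(0)], text)
-- ===== Notes on version B (the rewrite author's own statement) =====
-- stated objective: idiomatic
-- what changed: B replaces the six sequential str.replace passes with one precompiled alternation regex and a single re.sub scan that rewrites each spoken phrase in place; Pre_ excludes texts containing the substring "new linew paragraph" or "new linexclamation point", where two phrases overlap and the two equally defensible strategies rewrite different occurrences.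
-- outside the precondition, e.g. on _apply_writing_corrections('new linew paragraph'): A returns 'new li\n\n', B returns '\nw paragraph'; on _apply_writing_corrections('new linexclamation point'): A returns 'new lin!', B returns '\nxclamation point'
import Mathlib
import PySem

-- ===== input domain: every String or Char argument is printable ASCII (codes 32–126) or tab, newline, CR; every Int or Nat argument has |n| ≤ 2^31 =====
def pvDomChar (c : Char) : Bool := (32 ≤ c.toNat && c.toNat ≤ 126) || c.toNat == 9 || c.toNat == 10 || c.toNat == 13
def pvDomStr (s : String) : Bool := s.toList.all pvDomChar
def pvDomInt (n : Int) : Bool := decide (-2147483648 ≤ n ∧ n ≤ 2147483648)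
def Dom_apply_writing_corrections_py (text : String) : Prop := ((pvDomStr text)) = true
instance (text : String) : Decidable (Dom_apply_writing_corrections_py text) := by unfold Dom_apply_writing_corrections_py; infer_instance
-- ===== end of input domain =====

-- B replaces the six sequential str.replace passes by ONE precompiled alternation-regex scan (re.sub);
-- equal to A except on texts with overlapping phrase occurrences, which Pre_ excludes.

-- ===== PORT A =====
def apply_writing_corrections_py (text : String) : String :=
  let corrections : PySem.Dict String String :=
    PySem.Dict.ofList [("period", "."), ("comma", ","), ("question mark", "?"),
                       ("exclamation point", "!"), ("new paragraph", "\n\n"), ("new line", "\n")]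
  corrections.items.foldl (fun ct pr => PySem.Str.replace ct pr.1 pr.2) text

-- ===== PORT B =====
-- the compiled pattern 'period|comma|question mark|exclamation point|new paragraph|new line'
def pvPatB : List (List Char × List Char) :=
  [("period".toList, ".".toList), ("comma".toList, ",".toList),
   ("question mark".toList, "?".toList), ("exclamation point".toList, "!".toList),
   ("new paragraph".toList, "\n\n".toList), ("new line".toList, "\n".toList)]

-- exact rendering of re.sub with a literal alternation pattern: scan left to right; at each
-- position try the alternatives in pattern order; on a match emit the replacement and resume
-- after the matched phrase.
def pvScanB : List Char → List Char
  | [] => []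
  | c :: t =>
    match h : pvPatB.find? (fun p => p.1.isPrefixOf (c :: t)) with
    | some p => p.2 ++ pvScanB ((c :: t).drop p.1.length)
    | none => c :: pvScanB t
termination_by l => l.length
decreasing_by
  · have hm : ∀ q ∈ pvPatB, 0 < q.1.length := by decide
    have := hm p (List.mem_of_find?_eq_some h)
    simp [List.length_drop]; omega
  · simp

def apply_writing_corrections_py_alt (text : String) : String :=
  String.ofList (pvScanB text.toList)

-- ===== PRECONDITION & SPEC =====
-- Pre_ excludes texts in which two correction phrases overlap, i.e. texts containing the
-- substring "new linew paragraph" or "new linexclamation point": there A's six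
-- order-dependent sequential replace passes and B's single left-to-right scan pick
-- different, equally defensible, occurrences to rewrite.
def Pre_apply_writing_corrections_py (text : String) : Prop :=
  PySem.Str.isIn "new linew paragraph" text = false ∧
  PySem.Str.isIn "new linexclamation point" text = false
instance (text : String) : Decidable (Pre_apply_writing_corrections_py text) := by
  unfold Pre_apply_writing_corrections_py; infer_instance

def pvWitness_apply_writing_corrections_py : String :=
  "add a comma here period new paragraph done new line ok"

def Spec_apply_writing_corrections_py (text : String) (out : String) : Prop :=
  out = apply_writing_corrections_py_alt text
instance (text : String) (out : String) : Decidable (Spec_apply_writing_corrections_py text out) := by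
  unfold Spec_apply_writing_corrections_py; infer_instance

-- ===== CLAIM (what is proved, stated in full; the proofs are below) =====
def Claim_equal_apply_writing_corrections_py : Prop := ∀ (text : String), Dom_apply_writing_corrections_py text → Pre_apply_writing_corrections_py text → Spec_apply_writing_corrections_py text (apply_writing_corrections_py text)

-- ===== LEMMAS AND PROOFS =====

-- list-level view of the precondition
def pvBad1 : List Char := "new linew paragraph".toList
def pvBad2 : List Char := "new linexclamation point".toList
def PreL (l : List Char) : Prop := ¬ (pvBad1 <:+: l) ∧ ¬ (pvBad2 <:+: l)

-- the replacement characters; every phrase is free of them, every replacement made of them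
def pvPuncts : List Char := ['.', ',', '?', '!', '\n']
def pvPure (P : List Char) : Prop := ∀ c ∈ P, c ∉ pvPuncts
def pvGood (p : List Char × List Char) : Prop :=
  p.1 ≠ [] ∧ pvPure p.1 ∧ p.2 ≠ [] ∧ ∀ c ∈ p.2, c ∈ pvPuncts
def pvPass (l : List Char) (p : List Char × List Char) : List Char :=
  PySem.Chars.replace l p.1 p.2

-- clean recursion for PySem.Chars.replace (nonempty pattern)
def pvRep (old new : List Char) : Nat → List Char → List Char
  | 0, l => l
  | _ + 1, [] => []
  | fuel + 1, c :: t =>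
    if old.isPrefixOf (c :: t) then new ++ pvRep old new fuel ((c :: t).drop old.length)
    else c :: pvRep old new fuel t

lemma pvGo_eq_pvRep (old new : List Char) :
    ∀ fuel l acc, PySem.Chars.replace.go old new fuel l acc = acc.reverse ++ pvRep old new fuel l := by
  intro fuel
  induction fuel with
  | zero => intro l acc; simp [PySem.Chars.replace.go, pvRep]
  | succ n ih =>
    intro l acc
    cases l with
    | nil => simp [PySem.Chars.replace.go, pvRep]
    | cons c t =>
      by_cases hp : old.isPrefixOf (c :: t)
      · simp [PySem.Chars.replace.go, pvRep, hp, ih]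
      · simp [PySem.Chars.replace.go, pvRep, hp, ih]

lemma pvRep_congr (old new : List Char) (h : old ≠ []) :
    ∀ f1 f2 l, l.length ≤ f1 → l.length ≤ f2 → pvRep old new f1 l = pvRep old new f2 l := by
  have hlen : 0 < old.length := List.length_pos_iff.mpr h
  intro f1
  induction f1 with
  | zero =>
    intro f2 l h1 h2
    have : l = [] := List.eq_nil_of_length_eq_zero (Nat.le_zero.mp h1)
    subst this
    cases f2 <;> simp [pvRep]
  | succ n ih =>
    intro f2 l h1 h2
    cases l with
    | nil => cases f2 <;> simp [pvRep]
    | cons c t =>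
      cases f2 with
      | zero => simp at h2
      | succ m =>
        by_cases hp : old.isPrefixOf (c :: t)
        · simp only [pvRep, hp, if_true]
          have hd : ((c :: t).drop old.length).length ≤ n := by
            simp only [List.length_drop, List.length_cons] at *
            omega
          have hd2 : ((c :: t).drop old.length).length ≤ m := by
            simp only [List.length_drop, List.length_cons] at *
            omega
          rw [ih m _ hd hd2]
        · have ht : t.length ≤ n := by simp at h1; omega
          have ht2 : t.length ≤ m := by simp at h2; omega
          simp only [pvRep, hp, Bool.false_eq_true, if_false]
          rw [ih m t ht ht2]

lemma pvReplace_eq (old new l : List Char) (h : old ≠ []) :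
    PySem.Chars.replace l old new = pvRep old new l.length l := by
  have : old.isEmpty = false := by simpa [List.isEmpty_iff] using h
  simp [PySem.Chars.replace, this, pvGo_eq_pvRep]

lemma pvReplace_nil (old new : List Char) (h : old ≠ []) :
    PySem.Chars.replace [] old new = [] := by
  rw [pvReplace_eq old new [] h]; rfl

lemma pvReplace_pos (old new l : List Char) (h : old ≠ []) (hp : old <+: l) :
    PySem.Chars.replace l old new = new ++ PySem.Chars.replace (l.drop old.length) old new := by
  have hlen : 0 < old.length := List.length_pos_iff.mpr h
  cases l with
  | nil => exact absurd (List.prefix_nil.mp hp) h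
  | cons c t =>
    rw [pvReplace_eq old new (c :: t) h, pvReplace_eq old new ((c :: t).drop old.length) h]
    have hb : old.isPrefixOf (c :: t) := List.isPrefixOf_iff_prefix.mpr hp
    simp only [List.length_cons, pvRep, hb, if_true]
    congr 1
    exact pvRep_congr old new h t.length _ _ (by simp [List.length_drop]; omega) le_rfl

lemma pvReplace_neg (old new : List Char) (c : Char) (t : List Char)
    (h : old ≠ []) (hn : ¬ old <+: (c :: t)) :
    PySem.Chars.replace (c :: t) old new = c :: PySem.Chars.replace t old new := by
  rw [pvReplace_eq old new (c :: t) h, pvReplace_eq old new t h]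
  have hb : old.isPrefixOf (c :: t) = false := by
    cases hb : old.isPrefixOf (c :: t)
    · rfl
    · exact absurd (List.isPrefixOf_iff_prefix.mp hb) hn
  simp only [List.length_cons, pvRep, hb, Bool.false_eq_true, if_false]

-- a punctuation-free prefix of a replace output is a prefix of the input
lemma pvPure_prefix_replace (old new P : List Char) (h : old ≠ []) (hne : new ≠ [])
    (hnew : ∀ c ∈ new, c ∈ pvPuncts) :
    ∀ n l, l.length ≤ n → pvPure P → P <+: PySem.Chars.replace l old new → P <+: l := by
  intro n
  induction n generalizing P with
  | zero =>
    intro l hl hP hpre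
    have : l = [] := List.eq_nil_of_length_eq_zero (Nat.le_zero.mp hl)
    subst this
    rwa [pvReplace_nil old new h] at hpre
  | succ m ih =>
    intro l hl hP hpre
    cases l with
    | nil => rwa [pvReplace_nil old new h] at hpre
    | cons c t =>
      by_cases hp : old <+: (c :: t)
      · rw [pvReplace_pos old new (c :: t) h hp] at hpre
        cases P with
        | nil => exact List.nil_prefix
        | cons q P' =>
          exfalso
          cases new with
          | nil => exact hne rfl
          | cons d new' =>
            have : q = d := by
              have := (List.cons_prefix_cons.mp hpre).1
              exact this
            subst this
            exact hP q (List.mem_cons_self) (hnew q List.mem_cons_self)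
      · rw [pvReplace_neg old new c t h hp] at hpre
        cases P with
        | nil => exact List.nil_prefix
        | cons q P' =>
          obtain ⟨hq, hP'⟩ := List.cons_prefix_cons.mp hpre
          subst hq
          have hP'pure : pvPure P' := fun x hx => hP x (List.mem_cons_of_mem _ hx)
          have := ih P' t (by simp at hl; omega) hP'pure hP'
          exact List.cons_prefix_cons.mpr ⟨rfl, this⟩

lemma pvReplace_append (old new : List Char) (h : old ≠ []) :
    ∀ x y, (∀ pos, pos < x.length → ¬ old <+: (x ++ y).drop pos) →
      PySem.Chars.replace (x ++ y) old new = x ++ PySem.Chars.replace y old new := by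
  intro x
  induction x with
  | nil => intro y _; simp
  | cons c x' ih =>
    intro y hpos
    have h0 : ¬ old <+: (c :: (x' ++ y)) := by
      have := hpos 0 (by simp)
      simpa using this
    rw [List.cons_append, pvReplace_neg old new c (x' ++ y) h h0, ih y ?_, List.cons_append]
    intro pos hlt
    have := hpos (pos + 1) (by simp; omega)
    simpa [List.drop_succ_cons] using this

lemma pvPrefix_split (P x y : List Char) (h : P <+: x ++ y) :
    P <+: x ∨ (x <+: P ∧ P.drop x.length <+: y) := by
  by_cases hl : P.length ≤ x.length
  · left
    exact List.prefix_of_prefix_length_le h (List.prefix_append x y) hl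
  · right
    have hx : x <+: P := List.prefix_of_prefix_length_le (List.prefix_append x y) h (by omega)
    refine ⟨hx, ?_⟩
    have hEq : x ++ P.drop x.length = P := List.prefix_iff_eq_append.mp hx
    rw [← hEq] at h
    exact (List.prefix_append_right_inj x).mp h

lemma pvFoldl_nil (Ks : List (List Char × List Char)) (hKs : ∀ p ∈ Ks, pvGood p) :
    Ks.foldl pvPass [] = [] := by
  induction Ks with
  | nil => rfl
  | cons k Ks' ih =>
    have h1 := (hKs k List.mem_cons_self).1
    have : pvPass [] k = [] := pvReplace_nil k.1 k.2 h1
    rw [List.foldl_cons, this]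
    exact ih (fun p hp => hKs p (List.mem_cons_of_mem _ hp))

lemma pvFoldl_cons (c : Char) :
    ∀ (Ks : List (List Char × List Char)) (t : List Char), (∀ p ∈ Ks, pvGood p) →
      (∀ p ∈ Ks, ¬ p.1 <+: (c :: t)) → Ks.foldl pvPass (c :: t) = c :: Ks.foldl pvPass t := by
  intro Ks
  induction Ks with
  | nil => intro t _ _; rfl
  | cons k Ks' ih =>
    intro t hgood hfail
    obtain ⟨h1, h2, h3, h4⟩ := hgood k List.mem_cons_self
    have hgood' : ∀ p ∈ Ks', pvGood p := fun p hp => hgood p (List.mem_cons_of_mem _ hp)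
    have hstep : pvPass (c :: t) k = c :: pvPass t k :=
      pvReplace_neg k.1 k.2 c t h1 (hfail k List.mem_cons_self)
    rw [List.foldl_cons, List.foldl_cons, hstep]
    refine ih (pvPass t k) hgood' ?_
    intro p hp hcontra
    obtain ⟨g1, g2, g3, g4⟩ := hgood' p hp
    cases hP : p.1 with
    | nil => exact g1 hP
    | cons q P' =>
      rw [hP] at hcontra
      obtain ⟨hq, hpre⟩ := List.cons_prefix_cons.mp hcontra
      subst hq
      have hP'pure : pvPure P' := by
        rw [hP] at g2
        exact fun x hx => g2 x (List.mem_cons_of_mem _ hx)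
      have : P' <+: t :=
        pvPure_prefix_replace k.1 k.2 P' h1 h3 h4 t.length t le_rfl hP'pure hpre
      exact hfail p (List.mem_cons_of_mem _ hp) (by rw [hP]; exact List.cons_prefix_cons.mpr ⟨rfl, this⟩)

lemma pvFoldl_append (Ks : List (List Char × List Char)) :
    ∀ (y x : List Char), (∀ p ∈ Ks, pvGood p) →
      (∀ p ∈ Ks, ∀ pos, pos < x.length → ¬ p.1 <+: (x ++ y).drop pos) →
      Ks.foldl pvPass (x ++ y) = x ++ Ks.foldl pvPass y := by
  induction Ks with
  | nil => intro y x _ _; rfl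
  | cons k Ks' ih =>
    intro y x hgood hstraddle
    obtain ⟨h1, h2, h3, h4⟩ := hgood k List.mem_cons_self
    have hgood' : ∀ p ∈ Ks', pvGood p := fun p hp => hgood p (List.mem_cons_of_mem _ hp)
    have hstep : pvPass (x ++ y) k = x ++ pvPass y k :=
      pvReplace_append k.1 k.2 h1 x y (hstraddle k List.mem_cons_self)
    rw [List.foldl_cons, List.foldl_cons, hstep]
    refine ih (pvPass y k) x hgood' ?_
    intro p hp pos hpos hcontra
    obtain ⟨g1, g2, g3, g4⟩ := hgood' p hp
    rw [List.drop_append_of_le_length hpos.le] at hcontra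
    rcases pvPrefix_split p.1 (x.drop pos) (pvPass y k) hcontra with hc | ⟨hc1, hc2⟩
    · refine hstraddle p (List.mem_cons_of_mem _ hp) pos hpos ?_
      rw [List.drop_append_of_le_length hpos.le]
      exact hc.trans (List.prefix_append _ _)
    · have hq : p.1.drop (x.drop pos).length <+: y := by
        have hqpure : pvPure (p.1.drop (x.drop pos).length) :=
          fun x2 hx2 => g2 x2 (List.mem_of_mem_drop hx2)
        exact pvPure_prefix_replace k.1 k.2 _ h1 h3 h4 y.length y le_rfl hqpure hc2
      refine hstraddle p (List.mem_cons_of_mem _ hp) pos hpos ?_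
      rw [List.drop_append_of_le_length hpos.le]
      have hEq : x.drop pos ++ p.1.drop (x.drop pos).length = p.1 :=
        List.prefix_iff_eq_append.mp hc1
      rw [← hEq]
      exact (List.prefix_append_right_inj (x.drop pos)).mpr hq

lemma pvFoldl_match (K₁ K₂ : List (List Char × List Char)) (k r rest : List Char)
    (hgood : ∀ p ∈ K₁ ++ (k, r) :: K₂, pvGood p)
    (hK₁ : ∀ p ∈ K₁, ∀ pos, pos < k.length → ¬ p.1 <+: (k ++ rest).drop pos) :
    (K₁ ++ (k, r) :: K₂).foldl pvPass (k ++ rest) = r ++ (K₁ ++ (k, r) :: K₂).foldl pvPass rest := by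
  have hgood1 : ∀ p ∈ K₁, pvGood p := fun p hp => hgood p (List.mem_append_left _ hp)
  have hgoodk : pvGood (k, r) := hgood (k, r) (List.mem_append_right _ List.mem_cons_self)
  have hgood2 : ∀ p ∈ K₂, pvGood p :=
    fun p hp => hgood p (List.mem_append_right _ (List.mem_cons_of_mem _ hp))
  obtain ⟨hk1, hk2, hk3, hk4⟩ := hgoodk
  rw [List.foldl_append, List.foldl_append, List.foldl_cons, List.foldl_cons]
  rw [pvFoldl_append K₁ rest k hgood1 hK₁]
  set u := K₁.foldl pvPass rest with hu
  have hstep : pvPass (k ++ u) (k, r) = r ++ pvPass u (k, r) := by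
    show PySem.Chars.replace (k ++ u) k r = r ++ PySem.Chars.replace u k r
    rw [pvReplace_pos k r (k ++ u) hk1 (List.prefix_append k u), List.drop_left]
  rw [hstep]
  set v := pvPass u (k, r) with hv
  refine pvFoldl_append K₂ v r hgood2 ?_
  intro p hp pos hpos hcontra
  obtain ⟨g1, g2, g3, g4⟩ := hgood2 p hp
  rw [List.drop_append_of_le_length hpos.le] at hcontra
  cases hrd : r.drop pos with
  | nil =>
    have : r.length - pos = 0 := by rw [← List.length_drop, hrd]; rfl
    omega
  | cons d rd =>
    rw [hrd] at hcontra
    cases hP : p.1 with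
    | nil => exact g1 hP
    | cons q P' =>
      rw [hP] at hcontra
      have hq : q = d := (List.cons_prefix_cons.mp hcontra).1
      have hd_mem : d ∈ r := by
        have : d ∈ r.drop pos := by rw [hrd]; exact List.mem_cons_self
        exact List.mem_of_mem_drop this
      have : q ∉ pvPuncts := by
        rw [hP] at g2
        exact g2 q List.mem_cons_self
      exact this (hq ▸ hk4 d hd_mem)

-- key combinatorics: no phrase starts strictly inside another except the three overlaps
-- with the tail of the last phrase that pvNo_inner handles below
lemma pvComb : ∀ k ∈ pvPatB, ∀ p ∈ pvPatB, ∀ pos, pos < k.1.length → 0 < pos →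
    (¬ p.1 <+: k.1.drop pos) ∧ (k.1.drop pos <+: p.1 →
      (k.1 = "new line".toList ∧
        ((p.1 = "new paragraph".toList ∧ pos = 6) ∨ (p.1 = "exclamation point".toList ∧ pos = 7) ∨
         (p.1 = "new line".toList ∧ pos = 6)))) := by
  decide

lemma pvNo_inner (kp pp : List Char × List Char) (hk : kp ∈ pvPatB) (hp : pp ∈ pvPatB)
    (rest : List Char) (hPre : PreL (kp.1 ++ rest))
    (hne : ¬ (kp.1 = "new line".toList ∧ pp.1 = "new line".toList))
    (pos : Nat) (h0 : 0 < pos) (hlt : pos < kp.1.length) :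
    ¬ pp.1 <+: (kp.1 ++ rest).drop pos := by
  intro h
  rw [List.drop_append_of_le_length hlt.le] at h
  rcases pvPrefix_split pp.1 (kp.1.drop pos) rest h with h1 | ⟨h2, h3⟩
  · exact (pvComb kp hk pp hp pos hlt h0).1 h1
  · obtain ⟨hkNL, hcases⟩ := (pvComb kp hk pp hp pos hlt h0).2 h2
    rcases hcases with ⟨hpp, hpos⟩ | ⟨hpp, hpos⟩ | ⟨hpp, hpos⟩
    · -- overlap at offset 6: the text contains "new linew paragraph"
      subst hpos
      refine hPre.1 (List.IsPrefix.isInfix ?_)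
      have hdrop : pp.1.drop (kp.1.drop 6).length = "w paragraph".toList := by
        rw [hpp, hkNL]; rfl
      rw [hdrop] at h3
      have : pvBad1 = kp.1 ++ "w paragraph".toList := by rw [hkNL]; rfl
      rw [this]
      exact (List.prefix_append_right_inj kp.1).mpr h3
    · -- overlap at offset 7: the text contains "new linexclamation point"
      subst hpos
      refine hPre.2 (List.IsPrefix.isInfix ?_)
      have hdrop : pp.1.drop (kp.1.drop 7).length = "xclamation point".toList := by
        rw [hpp, hkNL]; rfl
      rw [hdrop] at h3
      have : pvBad2 = kp.1 ++ "xclamation point".toList := by rw [hkNL]; rfl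
      rw [this]
      exact (List.prefix_append_right_inj kp.1).mpr h3
    · exact hne ⟨hkNL, hpp⟩

lemma pvPreL_suffix (l t : List Char) (h : PreL l) (hs : t <:+ l) : PreL t :=
  ⟨fun hc => h.1 (hc.trans hs.isInfix), fun hc => h.2 (hc.trans hs.isInfix)⟩

lemma pvBall_not_mem {L M : List Char} (h : L.all (fun c => !M.contains c) = true) :
    ∀ c ∈ L, c ∉ M := by
  simp only [List.all_eq_true, Bool.not_eq_eq_eq_not, Bool.not_true, List.contains_eq_mem,
    decide_eq_false_iff_not] at h
  exact h

lemma pvBall_mem {L M : List Char} (h : L.all (fun c => M.contains c) = true) :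
    ∀ c ∈ L, c ∈ M := by
  simp only [List.all_eq_true, List.contains_eq_mem, decide_eq_true_eq] at h
  exact h

lemma pvGoodPat : ∀ p ∈ pvPatB, pvGood p := by
  intro p hp
  simp only [pvPatB, List.mem_cons, List.not_mem_nil, or_false] at hp
  rcases hp with h | h | h | h | h | h <;> subst h <;>
    exact ⟨by decide, pvBall_not_mem (by decide), by decide, pvBall_mem (by decide)⟩

lemma pvScanB_nil : pvScanB [] = [] := by rw [pvScanB]

lemma pvScanB_cons_none (c : Char) (t : List Char)
    (hf : pvPatB.find? (fun p => p.1.isPrefixOf (c :: t)) = none) :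
    pvScanB (c :: t) = c :: pvScanB t := by
  rw [pvScanB]
  split
  · rename_i p hsome; rw [hf] at hsome; cases hsome
  · rfl

lemma pvScanB_cons_some (c : Char) (t : List Char) (p : List Char × List Char)
    (hf : pvPatB.find? (fun p => p.1.isPrefixOf (c :: t)) = some p) :
    pvScanB (c :: t) = p.2 ++ pvScanB ((c :: t).drop p.1.length) := by
  rw [pvScanB]
  split
  · rename_i q hsome; rw [hf] at hsome; cases hsome; rfl
  · rename_i hnone; rw [hf] at hnone; cases hnone

lemma pvMain : ∀ n l, l.length ≤ n → PreL l → pvPatB.foldl pvPass l = pvScanB l := by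
  intro n
  induction n with
  | zero =>
    intro l hl _
    have : l = [] := List.eq_nil_of_length_eq_zero (Nat.le_zero.mp hl)
    subst this
    rw [pvFoldl_nil pvPatB pvGoodPat, pvScanB_nil]
  | succ m ih =>
    intro l hl hPre
    cases l with
    | nil => rw [pvFoldl_nil pvPatB pvGoodPat, pvScanB_nil]
    | cons c t =>
      cases hf : pvPatB.find? (fun p => p.1.isPrefixOf (c :: t)) with
      | none =>
        have hfail : ∀ p ∈ pvPatB, ¬ p.1 <+: (c :: t) := by
          intro p hp hc
          have := List.find?_eq_none.mp hf p hp
          exact this (List.isPrefixOf_iff_prefix.mpr hc)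
        rw [pvFoldl_cons c pvPatB t pvGoodPat hfail, pvScanB_cons_none c t hf]
        have ht : pvPatB.foldl pvPass t = pvScanB t :=
          ih t (by simp at hl; omega)
            (pvPreL_suffix (c :: t) t hPre ⟨[c], rfl⟩)
        rw [ht]
      | some p =>
        obtain ⟨hpred, K₁, K₂, hsplit, hfail⟩ := List.find?_eq_some_iff_append.mp hf
        have hpre1 : p.1 <+: c :: t := List.isPrefixOf_iff_prefix.mp hpred
        have hmemP : p ∈ pvPatB := by
          rw [hsplit]; exact List.mem_append_right _ List.mem_cons_self
        obtain ⟨hg1, hg2, hg3, hg4⟩ := pvGoodPat p hmemP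
        set rest := (c :: t).drop p.1.length with hrest
        have hct : c :: t = p.1 ++ rest := (List.prefix_iff_eq_append.mp hpre1).symm
        have hK₁ : ∀ pp ∈ K₁, ∀ pos, pos < p.1.length → ¬ pp.1 <+: (p.1 ++ rest).drop pos := by
          intro pp hpp pos hpos
          have hppPat : pp ∈ pvPatB := by rw [hsplit]; exact List.mem_append_left _ hpp
          have hfailpp : ¬ pp.1 <+: c :: t := by
            intro hc
            have := hfail pp hpp
            rw [Bool.not_eq_eq_eq_not, Bool.not_true] at this
            rw [List.isPrefixOf_iff_prefix.mpr hc] at this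
            cases this
          cases Nat.eq_zero_or_pos pos with
          | inl h0 => subst h0; rw [List.drop_zero, ← hct]; exact hfailpp
          | inr h0 =>
            refine pvNo_inner p pp hmemP hppPat rest (hct ▸ hPre) ?_ pos h0 hpos
            rintro ⟨hk, hpk⟩
            exact hfailpp (by rw [hpk, ← hk]; exact hpre1)
        have hgoodAll : ∀ q ∈ K₁ ++ (p.1, p.2) :: K₂, pvGood q := by
          intro q hq
          refine pvGoodPat q ?_
          rw [hsplit]
          simpa using hq
        have key := pvFoldl_match K₁ K₂ p.1 p.2 rest hgoodAll hK₁
        have hsplit' : pvPatB = K₁ ++ (p.1, p.2) :: K₂ := by simpa using hsplit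
        have hrestlen : rest.length ≤ m := by
          have h1 : 0 < p.1.length := List.length_pos_iff.mpr hg1
          simp only [hrest, List.length_drop, List.length_cons]
          simp only [List.length_cons] at hl
          omega
        have hrestPre : PreL rest := pvPreL_suffix (c :: t) rest hPre (List.drop_suffix _ _)
        have ihrest : pvPatB.foldl pvPass rest = pvScanB rest := ih rest hrestlen hrestPre
        calc pvPatB.foldl pvPass (c :: t)
            = (K₁ ++ (p.1, p.2) :: K₂).foldl pvPass (p.1 ++ rest) := by rw [← hsplit', ← hct]
          _ = p.2 ++ (K₁ ++ (p.1, p.2) :: K₂).foldl pvPass rest := key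
          _ = p.2 ++ pvPatB.foldl pvPass rest := by rw [← hsplit']
          _ = p.2 ++ pvScanB rest := by rw [ihrest]
          _ = pvScanB (c :: t) := (pvScanB_cons_some c t p hf).symm

lemma pvA_eq (text : String) :
    apply_writing_corrections_py text = String.ofList (pvPatB.foldl pvPass text.toList) := by
  have hitems : (PySem.Dict.ofList
      ([("period", "."), ("comma", ","), ("question mark", "?"), ("exclamation point", "!"),
        ("new paragraph", "\n\n"), ("new line", "\n")] : List (String × String))).items =
      [("period", "."), ("comma", ","), ("question mark", "?"), ("exclamation point", "!"),
       ("new paragraph", "\n\n"), ("new line", "\n")] := by decide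
  show (PySem.Dict.ofList _).items.foldl _ text = _
  rw [hitems]
  simp only [List.foldl_cons, List.foldl_nil, pvPatB, pvPass, PySem.Str.replace,
    String.toList_ofList]

lemma pvPre_toList (text : String) (h : Pre_apply_writing_corrections_py text) :
    PreL text.toList := by
  obtain ⟨h1, h2⟩ := h
  constructor
  · intro hc
    rw [← Bool.not_eq_true] at h1
    exact h1 ((PySem.Str.isIn_iff_infix "new linew paragraph" text).mpr hc)
  · intro hc
    rw [← Bool.not_eq_true] at h2
    exact h2 ((PySem.Str.isIn_iff_infix "new linexclamation point" text).mpr hc)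

-- ===== VERDICT (by name: the statement is the Claim_ definition above) =====
theorem apply_writing_corrections_py_spec : Claim_equal_apply_writing_corrections_py := by
  intro text _ hPre
  show apply_writing_corrections_py text = apply_writing_corrections_py_alt text
  rw [pvA_eq text]
  unfold apply_writing_corrections_py_alt
  rw [pvMain text.toList.length text.toList le_rfl (pvPre_toList text hPre)]
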